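-- pv_equiv track=rewrite | github.com/fengjiaxin1993/CSM-Service | test/table_test.py | clean_table_data
-- ===== SOURCE A (Python) =====
-- def clean_table_data(table):
--     if not table:
--         return []
--     cleaned_cells = []
--     for row in table:
--         new_row = []
--         for cell in row:
--             if cell is None:
--                 new_row.append("")
--             else:
--                 new_cell = str(cell).strip().replace("\n", "").replace("\t", "")
--                 new_row.append(new_cell)
--         cleaned_cells.append(new_row)
--     transposed = list(zip(*cleaned_cells))
--     non_empty_cols = [col for col in transposed if any(cell.strip() for cell in col)]
--     if not non_empty_cols:
--         return []
--     cleaned_table = list(zip(*non_empty_cols))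
--     cleaned_table = [row for row in cleaned_table if any(cell.strip() for cell in row)]
--     return cleaned_table
-- ===== SOURCE B (Python) =====
-- def clean_table_data(table):
--     if not table:
--         return []
--     rows = [["" if cell is None else str(cell).strip().replace("\n", "").replace("\t", "")
--              for cell in row]
--             for row in table]
--     ncols = min(len(r) for r in rows)
--     kept = [j for j in range(ncols) if any(r[j].strip() for r in rows)]
--     if not kept:
--         return []
--     return [tuple(r[j] for j in kept)
--             for r in rows if any(r[j].strip() for j in kept)]
-- ===== Notes on version B (the rewrite author's own statement) =====
-- stated objective: simpler
-- what changed: Replaces the double zip-transpose (transpose, filter columns, transpose back, filter rows) by a single pass that computes the kept column indices over range(min row length) and then projects each row onto those indices, filtering empty rows directly.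
import Mathlib
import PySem

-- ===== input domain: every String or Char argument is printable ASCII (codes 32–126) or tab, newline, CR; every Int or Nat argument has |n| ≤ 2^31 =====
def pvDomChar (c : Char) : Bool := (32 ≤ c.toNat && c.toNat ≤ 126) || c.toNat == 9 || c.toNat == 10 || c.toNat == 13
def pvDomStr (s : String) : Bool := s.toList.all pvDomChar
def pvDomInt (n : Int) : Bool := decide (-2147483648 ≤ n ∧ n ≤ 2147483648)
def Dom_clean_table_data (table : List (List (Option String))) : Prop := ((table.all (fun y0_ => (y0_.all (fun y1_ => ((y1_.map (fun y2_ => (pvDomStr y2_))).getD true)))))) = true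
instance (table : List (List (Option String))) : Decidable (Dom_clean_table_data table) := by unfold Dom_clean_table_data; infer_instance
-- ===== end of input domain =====

-- B replaces A's double zip-transpose by computing the kept column indices once and
-- projecting each row onto them (objective: simpler).

-- ===== PORT A =====
-- cell cleaning: None -> "", else str(cell).strip().replace("\n","").replace("\t","")
def pvClean (cell : Option String) : String :=
  match cell with
  | none => ""
  | some s => PySem.Str.replace (PySem.Str.replace (PySem.Str.strip s) "\n" "") "\t" ""

-- hand port of zip(*xss): rows truncated to the shortest list; exact (zip() with no
-- iterables, or with an empty one, yields [], matching min?.getD 0 = 0 here)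
def pyZipStar (xss : List (List String)) : List (List String) :=
  (List.range (((xss.map List.length).min?).getD 0)).map
    (fun i => xss.map (fun r => r.getD i ""))

def clean_table_data (table : List (List (Option String))) : List (List String) :=
  if table = [] then []
  else
    let cleaned_cells := table.map (fun row => row.map pvClean)
    let transposed := pyZipStar cleaned_cells
    let non_empty_cols := transposed.filter (fun col => col.any (fun c => PySem.Str.strip c != ""))
    if non_empty_cols = [] then []
    else (pyZipStar non_empty_cols).filter (fun row => row.any (fun c => PySem.Str.strip c != ""))

-- ===== PORT B =====
def clean_table_data_alt (table : List (List (Option String))) : List (List String) :=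
  if table = [] then []
  else
    let rows := table.map (fun row => row.map pvClean)
    let ncols := ((rows.map List.length).min?).getD 0
    let kept := (List.range ncols).filter
      (fun j => rows.any (fun r => PySem.Str.strip (r.getD j "") != ""))
    if kept = [] then []
    else (rows.filter (fun r => kept.any (fun j => PySem.Str.strip (r.getD j "") != ""))).map
      (fun r => kept.map (fun j => r.getD j ""))

-- ===== PRECONDITION & SPEC =====
def Spec_clean_table_data (table : List (List (Option String))) (out : List (List String)) : Prop := out = clean_table_data_alt table
instance (table : List (List (Option String))) (out : List (List String)) : Decidable (Spec_clean_table_data table out) := by unfold Spec_clean_table_data; infer_instance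

-- ===== CLAIM (what is proved, stated in full; the proofs are below) =====
def Claim_equal_clean_table_data : Prop := ∀ (table : List (List (Option String))), Dom_clean_table_data table → Spec_clean_table_data table (clean_table_data table)

-- ===== LEMMAS AND PROOFS =====

theorem pv_filter_map {α β : Type} (f : α → β) (p : β → Bool) (l : List α) :
    (l.map f).filter p = (l.filter (fun a => p (f a))).map f := by
  induction l with
  | nil => rfl
  | cons a t ih =>
    by_cases h : p (f a) <;> simp [h, ih]

theorem pv_map_range_getD {α β : Type} (f : α → β) (d : α) (l : List α) :
    (List.range l.length).map (fun k => f (l.getD k d)) = l.map f := by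
  induction l with
  | nil => rfl
  | cons a t ih =>
    rw [List.length_cons, List.range_succ_eq_map, List.map_cons, List.map_map]
    simp only [Function.comp_def, List.getD_cons_zero, List.getD_cons_succ]
    rw [ih, List.map_cons]

theorem pv_min?_cons_const (a : Nat) : ∀ (t : List Nat), (∀ y ∈ t, y = a) → (a :: t).min? = some a := by
  intro t
  induction t with
  | nil => intro _; simp
  | cons b s ih =>
    intro h
    have hb : b = a := h b (by simp)
    subst hb
    rw [List.min?_cons, ih (fun y hy => h y (by simp [hy]))]
    simp

theorem pv_min?_const {l : List Nat} {a : Nat} (hne : l ≠ []) (h : ∀ x ∈ l, x = a) :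
    l.min? = some a := by
  cases l with
  | nil => cases hne rfl
  | cons x t =>
    have hx : x = a := h x (by simp)
    subst hx
    exact pv_min?_cons_const x t (fun y hy => h y (by simp [hy]))

theorem pv_getD_map_lt {α β : Type} (g : α → β) (l : List α) (k : Nat) (hk : k < l.length)
    (d : β) (d' : α) : (l.map g).getD k d = g (l.getD k d') := by
  have h1 : (l.map g)[k]? = some (g l[k]) := by
    rw [List.getElem?_map, List.getElem?_eq_getElem hk]; rfl
  have h2 : l[k]? = some l[k] := List.getElem?_eq_getElem hk
  simp [List.getD, h1, h2]

theorem pv_main (table : List (List (Option String))) :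
    clean_table_data table = clean_table_data_alt table := by
  by_cases htab : table = []
  · simp [clean_table_data, clean_table_data_alt, htab]
  · unfold clean_table_data clean_table_data_alt
    rw [if_neg htab, if_neg htab]
    simp only []
    set rows := table.map (fun row => row.map pvClean) with hrows
    have hrne : rows ≠ [] := by
      simpa [hrows] using htab
    set P : String → Bool := fun c => PySem.Str.strip c != "" with hP
    set n : Nat := ((rows.map List.length).min?).getD 0 with hn
    set colAt : Nat → List String := fun j => rows.map (fun r => r.getD j "") with hcolAt
    -- cols of A = kept.map colAt
    have hstep1 : (pyZipStar rows).filter (fun col => col.any P)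
        = ((List.range n).filter (fun j => rows.any (fun r => P (r.getD j "")))).map colAt := by
      rw [pyZipStar, ← hn, pv_filter_map]
      congr 1
      apply List.filter_congr
      intro j _
      simp [List.any_map, Function.comp_def]
    set kept := (List.range n).filter (fun j => rows.any (fun r => P (r.getD j ""))) with hkept
    rw [hstep1]
    by_cases hk : kept = []
    · simp [hk]
    · rw [if_neg (by simpa using hk), if_neg hk]
      -- the second transpose
      have hlen : ((kept.map colAt).map List.length).min? = some rows.length := by
        apply pv_min?_const
        · simpa using hk
        · intro x hx
          simp only [List.map_map, List.mem_map] at hx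
          obtain ⟨j, _, rfl⟩ := hx
          simp [hcolAt]
      have hzip : pyZipStar (kept.map colAt)
          = rows.map (fun r => kept.map (fun j => r.getD j "")) := by
        rw [pyZipStar, hlen]
        have hrw : ∀ k ∈ List.range rows.length,
            (kept.map colAt).map (fun c => c.getD k "")
              = kept.map (fun j => (rows.getD k []).getD j "") := by
          intro k hkmem
          have hklt : k < rows.length := List.mem_range.mp hkmem
          rw [List.map_map]
          apply List.map_congr_left
          intro j _
          simp only [Function.comp_def, hcolAt]
          exact pv_getD_map_lt _ _ _ hklt _ []
        calc (List.range rows.length).map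
              (fun k => (kept.map colAt).map (fun c => c.getD k ""))
            = (List.range rows.length).map
              (fun k => kept.map (fun j => (rows.getD k []).getD j "")) :=
              List.map_congr_left hrw
          _ = _ := pv_map_range_getD (fun r => kept.map (fun j => r.getD j "")) [] rows
      rw [hzip, pv_filter_map]
      congr 1
      apply List.filter_congr
      intro r _
      simp [hP, List.any_map, Function.comp_def]

-- ===== VERDICT (by name: the statement is the Claim_ definition above) =====
theorem clean_table_data_spec : Claim_equal_clean_table_data := by
  intro table _
  unfold Spec_clean_table_data
  exact pv_main table
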